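-- pv_equiv track=rewrite | github.com/Nesterovasasha/practicum_06 | 7ex.py | can_order_sushi
-- ===== SOURCE A (Python) =====
-- def can_order_sushi(K):
--     if K < 5:
--         return False
--     if K % 5 == 0 or K % 7 == 0:
--         return True
--
--     for i in range(K // 5 + 1):
--         for j in range(K // 7 + 1):
--             if (i * 5 + j * 7) == K:
--                 return True
--
--     return False
-- ===== SOURCE B (Python) =====
-- def can_order_sushi(K):
--     if K < 5:
--         return False
--     for i in range(K // 5 + 1):
--         if (K - 5 * i) % 7 == 0:
--             return True
--     return False
-- ===== Notes on version B (the rewrite author's own statement) =====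
-- stated objective: faster
-- what changed: Replaced the nested quadratic search over all (i, j) pairs by a single linear loop over i that tests divisibility of the remainder after removing i five-piece sets, which also subsumes A's separate early-return modulus checks.
import Mathlib
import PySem

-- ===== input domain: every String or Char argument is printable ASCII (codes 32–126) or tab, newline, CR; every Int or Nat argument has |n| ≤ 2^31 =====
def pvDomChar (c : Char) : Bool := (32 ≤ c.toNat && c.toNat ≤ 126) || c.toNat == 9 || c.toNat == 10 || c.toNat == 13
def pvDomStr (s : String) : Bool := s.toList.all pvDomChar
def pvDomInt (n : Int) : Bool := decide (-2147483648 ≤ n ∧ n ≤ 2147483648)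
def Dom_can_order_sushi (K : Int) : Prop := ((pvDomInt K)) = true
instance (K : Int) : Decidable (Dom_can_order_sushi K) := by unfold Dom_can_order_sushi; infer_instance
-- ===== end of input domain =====

-- B replaces A's nested O(K^2) search over (i, j) by a single pass over i
-- testing 7 ∣ (K - 5i); objective: faster (asymptotic).

-- ===== PORT A =====
def can_order_sushi (K : Int) : Bool :=
  if K < 5 then false
  else if (PySem.Int.mod K 5 == 0) || (PySem.Int.mod K 7 == 0) then true
  else if (PySem.List.pyRange 0 (PySem.Int.floordiv K 5 + 1) 1).any (fun i =>
            (PySem.List.pyRange 0 (PySem.Int.floordiv K 7 + 1) 1).any (fun j =>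
              i * 5 + j * 7 == K))
  then true
  else false

-- ===== PORT B =====
def can_order_sushi_alt (K : Int) : Bool :=
  if K < 5 then false
  else (PySem.List.pyRange 0 (PySem.Int.floordiv K 5 + 1) 1).any (fun i =>
         PySem.Int.mod (K - 5 * i) 7 == 0)

-- ===== PRECONDITION & SPEC =====
def Spec_can_order_sushi (K : Int) (out : Bool) : Prop := out = can_order_sushi_alt K
instance (K : Int) (out : Bool) : Decidable (Spec_can_order_sushi K out) := by unfold Spec_can_order_sushi; infer_instance

-- ===== CLAIM (what is proved, stated in full; the proofs are below) =====
def Claim_equal_can_order_sushi : Prop := ∀ (K : Int), Dom_can_order_sushi K → Spec_can_order_sushi K (can_order_sushi K)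

-- ===== LEMMAS AND PROOFS =====

theorem can_order_sushi_eq (K : Int) : can_order_sushi K = can_order_sushi_alt K := by
  unfold can_order_sushi can_order_sushi_alt
  by_cases hK : K < 5
  · simp [hK]
  · simp only [if_neg hK]
    push_neg at hK
    have h5 : (0 : Int) < 5 := by norm_num
    have h7 : (0 : Int) < 7 := by norm_num
    rw [Bool.eq_iff_iff]
    simp only [Bool.or_eq_true, beq_iff_eq, List.any_eq_true, PySem.List.mem_pyRange_one,
      PySem.Int.mod_eq_zero_iff_dvd, Bool.if_true_left, Bool.if_false_right,
      Bool.and_true, decide_eq_true_eq]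
    constructor
    · rintro (⟨h | h⟩ | ⟨i, ⟨hi0, hi1⟩, j, ⟨hj0, hj1⟩, hij⟩)
      · -- 5 ∣ K : take i = K / 5
        obtain ⟨c, hc⟩ := h
        refine ⟨c, ⟨by omega, ?_⟩, by omega⟩
        have := (PySem.Int.le_floordiv_iff_mul_le (a := K) (b := 5) (q := c) h5).mpr (by omega)
        omega
      · -- 7 ∣ K : take i = 0
        refine ⟨0, ⟨le_refl 0, ?_⟩, by simpa using h⟩
        have := (PySem.Int.le_floordiv_iff_mul_le (a := K) (b := 5) (q := 0) h5).mpr (by omega)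
        omega
      · exact ⟨i, ⟨hi0, hi1⟩, by omega⟩
    · rintro ⟨i, ⟨hi0, hi1⟩, hdvd⟩
      obtain ⟨j, hj⟩ := hdvd
      have hi5 : i * 5 ≤ K :=
        (PySem.Int.le_floordiv_iff_mul_le (a := K) (b := 5) (q := i) h5).mp (by omega)
      have hj0 : 0 ≤ j := by omega
      have hj7 : j * 7 ≤ K := by omega
      have hjle := (PySem.Int.le_floordiv_iff_mul_le (a := K) (b := 7) (q := j) h7).mpr hj7
      exact Or.inr ⟨i, ⟨hi0, hi1⟩, j, ⟨hj0, by omega⟩, by omega⟩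

-- ===== VERDICT (by name: the statement is the Claim_ definition above) =====
theorem can_order_sushi_spec : Claim_equal_can_order_sushi := by
  intro K _
  unfold Spec_can_order_sushi
  exact can_order_sushi_eq K
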